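-- pv_equiv track=rewrite | github.com/hyperledger-iroha/iroha | ci/check_tests_guard.py | find_test_blocks
-- ===== SOURCE A (Python) =====
-- from typing import Dict, Iterable, List, Optional, Sequence, Set, Tuple
--
-- def find_test_blocks(lines: Sequence[str]) -> List[Tuple[int, int]]:
--     blocks: List[Tuple[int, int]] = []
--     for idx, line in enumerate(lines):
--         if "mod tests" not in line:
--             continue
--         window_start = max(idx - 3, 0)
--         if not any("cfg(test)" in candidate for candidate in lines[window_start:idx]):
--             continue
--
--         brace_depth = 0
--         found_open = False
--         for end_idx in range(idx, len(lines)):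
--             brace_depth += lines[end_idx].count("{")
--             brace_depth -= lines[end_idx].count("}")
--             if "{" in lines[end_idx]:
--                 found_open = True
--             if found_open and brace_depth == 0:
--                 blocks.append((idx + 1, end_idx + 1))
--                 break
--     return blocks
-- ===== SOURCE B (Python) =====
-- def find_test_blocks(lines):
--     n = len(lines)
--     mods = ["mod tests" in line for line in lines]
--     cfgs = ["cfg(test)" in line for line in lines]
--     opens = ["{" in line for line in lines]
--     pre = [0]
--     total = 0
--     for line in lines:
--         total += line.count("{") - line.count("}")
--         pre.append(total)
--     blocks = []
--     for idx in range(n):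
--         if mods[idx] and any(cfgs[max(idx - 3, 0):idx]):
--             open_idx = None
--             for j in range(idx, n):
--                 if opens[j]:
--                     open_idx = j
--                     break
--             if open_idx is not None:
--                 for e in range(open_idx, n):
--                     if pre[e + 1] == pre[idx]:
--                         blocks.append((idx + 1, e + 1))
--                         break
--     return blocks
-- ===== Notes on version B (the rewrite author's own statement) =====
-- stated objective: alternative
-- what changed: B precomputes per-line flags ('mod tests', 'cfg(test)', '{') and a prefix-sum array of net brace counts in one pass, then finds each block end as the first index at or after the first opening line where the prefix sum returns to its start value, instead of A's re-scanning raw lines with substring tests and brace counting inside every candidate's inner loop.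
import Mathlib
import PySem

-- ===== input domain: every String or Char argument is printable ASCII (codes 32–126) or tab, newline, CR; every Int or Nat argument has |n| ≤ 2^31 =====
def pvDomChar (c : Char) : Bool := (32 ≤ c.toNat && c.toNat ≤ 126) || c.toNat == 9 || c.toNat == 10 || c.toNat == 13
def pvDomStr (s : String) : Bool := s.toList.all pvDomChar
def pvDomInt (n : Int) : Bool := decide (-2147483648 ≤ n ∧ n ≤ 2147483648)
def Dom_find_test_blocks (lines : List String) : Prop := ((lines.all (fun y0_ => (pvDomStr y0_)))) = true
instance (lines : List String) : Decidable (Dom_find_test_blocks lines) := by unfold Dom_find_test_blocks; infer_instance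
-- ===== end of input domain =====

-- B replaces A's per-candidate rescanning of raw lines (substring tests and brace counts inside the
-- inner loop) by one precomputation pass: per-line flags and a prefix-sum of net brace counts, so the
-- block end is the first index where the prefix sum returns to its start value (objective: alternative).

-- ===== PORT A =====
-- inner 'for end_idx in range(idx, len(lines)): … break' loop of A, state (brace_depth, found_open)
def pvInnerA (lines : List String) : List Int → Int → Bool → Option Int
  | [], _, _ => none
  | e :: rest, depth, found =>
    let line := PySem.List.pyGetD lines e ""
    let depth' := depth + (PySem.Str.count line "{" : Int) - (PySem.Str.count line "}" : Int)
    let found' := found || PySem.Str.isIn "{" line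
    if found' && depth' == 0 then some e
    else pvInnerA lines rest depth' found'

def find_test_blocks (lines : List String) : List (Int × Int) :=
  (PySem.List.enumerate lines).foldl (fun blocks p =>
    if !PySem.Str.isIn "mod tests" p.2 then blocks
    else
      let window_start := max (p.1 - 3) 0
      if !((PySem.List.slice lines (some window_start) (some p.1)).any
            (fun c => PySem.Str.isIn "cfg(test)" c)) then blocks
      else
        match pvInnerA lines (PySem.List.pyRange p.1 (lines.length : Int)) 0 false with
        | some e => blocks ++ [(p.1 + 1, e + 1)]
        | none => blocks) []

-- ===== PORT B =====
-- 'for j in range(a, n): if p(j): … break' of B, returning the first hit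
def pvFindFirst (p : Int → Bool) : List Int → Option Int
  | [] => none
  | j :: rest => if p j then some j else pvFindFirst p rest

def find_test_blocks_alt (lines : List String) : List (Int × Int) :=
  let n : Int := (lines.length : Int)
  let mods := lines.map (fun line => PySem.Str.isIn "mod tests" line)
  let cfgs := lines.map (fun line => PySem.Str.isIn "cfg(test)" line)
  let opens := lines.map (fun line => PySem.Str.isIn "{" line)
  let pt := lines.foldl (fun (acc : List Int × Int) line =>
      let t := acc.2 + (PySem.Str.count line "{" : Int) - (PySem.Str.count line "}" : Int)
      (acc.1 ++ [t], t)) ([0], 0)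
  let pre := pt.1
  (PySem.List.pyRange 0 n).foldl (fun blocks idx =>
    if PySem.List.pyGetD mods idx false &&
       ((PySem.List.slice cfgs (some (max (idx - 3) 0)) (some idx)).any id) then
      match pvFindFirst (fun j => PySem.List.pyGetD opens j false) (PySem.List.pyRange idx n) with
      | some o =>
        match pvFindFirst (fun e => PySem.List.pyGetD pre (e + 1) 0 == PySem.List.pyGetD pre idx 0)
                (PySem.List.pyRange o n) with
        | some e => blocks ++ [(idx + 1, e + 1)]
        | none => blocks
      | none => blocks
    else blocks) []

-- ===== PRECONDITION & SPEC =====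
def Spec_find_test_blocks (lines : List String) (out : List (Int × Int)) : Prop := out = find_test_blocks_alt lines
instance (lines : List String) (out : List (Int × Int)) : Decidable (Spec_find_test_blocks lines out) := by unfold Spec_find_test_blocks; infer_instance

-- ===== CLAIM (what is proved, stated in full; the proofs are below) =====
def Claim_equal_find_test_blocks : Prop := ∀ (lines : List String), Dom_find_test_blocks lines → Spec_find_test_blocks lines (find_test_blocks lines)

-- ===== LEMMAS AND PROOFS =====

-- net brace count of one line, and the prefix sum of the first k lines
def pvNet (line : String) : Int := (PySem.Str.count line "{" : Int) - (PySem.Str.count line "}" : Int)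
def pvS (lines : List String) (k : Int) : Int := ((lines.take k.toNat).map pvNet).sum

theorem pvNet_empty : pvNet "" = 0 := by decide

theorem pvGetD_default {α : Type} (xs : List α) (i : Int) (d : α)
    (h : (xs.length : Int) ≤ i) : PySem.List.pyGetD xs i d = d := by
  have h0 : 0 ≤ i := le_trans (by positivity) h
  have h1 : ¬ i < (xs.length : Int) := by omega
  simp [PySem.List.pyGetD, PySem.List.pyGet?, PySem.List.pyIdx?, h0, h1]

theorem pvS_step (lines : List String) (a : Int) (ha : 0 ≤ a) :
    pvS lines (a + 1) = pvS lines a + pvNet (PySem.List.pyGetD lines a "") := by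
  unfold pvS
  have h1 : (a + 1).toNat = a.toNat + 1 := by omega
  rw [h1, List.take_add_one, List.map_append, List.sum_append]
  by_cases hlt : a.toNat < lines.length
  · have h2 : a < (lines.length : Int) := by omega
    rw [PySem.List.pyGetD_eq_getElem lines "" ha h2]
    simp [List.getElem?_map, List.getElem?_eq_getElem hlt]
  · have hge : (lines.length : Int) ≤ a := by omega
    rw [pvGetD_default _ _ _ hge]
    rw [List.getElem?_eq_none_iff.mpr (by simpa using hlt)]
    simp [pvNet_empty]

theorem pvFindFirst_congr (p q : Int → Bool) (l : List Int)
    (h : ∀ x ∈ l, p x = q x) : pvFindFirst p l = pvFindFirst q l := by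
  induction l with
  | nil => rfl
  | cons x xs ih =>
    simp only [pvFindFirst, h x (by simp)]
    split
    · rfl
    · exact ih (fun y hy => h y (by simp [hy]))

theorem pvPhase2Aux (lines : List String) (b : Int) :
    ∀ (n : Nat) (a d : Int), 0 ≤ a → (b - a).toNat = n →
      pvInnerA lines (PySem.List.pyRange a b) d true =
        pvFindFirst (fun e => d + (pvS lines (e + 1) - pvS lines a) == 0)
          (PySem.List.pyRange a b) := by
  intro n
  induction n with
  | zero =>
    intro a d ha hn
    rw [PySem.List.pyRange_one_eq_nil (by omega)]
    rfl
  | succ m ih =>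
    intro a d ha hn
    have hlt : a < b := by omega
    rw [PySem.List.pyRange_one_cons hlt]
    simp only [pvInnerA, pvFindFirst, Bool.true_or, Bool.true_and]
    have hstep := pvS_step lines a ha
    have hc : d + (PySem.Str.count (PySem.List.pyGetD lines a "") "{" : Int)
              - (PySem.Str.count (PySem.List.pyGetD lines a "") "}" : Int)
            = d + (pvS lines (a + 1) - pvS lines a) := by
      rw [hstep]; unfold pvNet; ring
    rw [hc]
    split
    · rfl
    · rw [ih (a + 1) (d + (pvS lines (a + 1) - pvS lines a)) (by omega) (by omega)]
      apply pvFindFirst_congr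
      intro e _
      have : d + (pvS lines (a + 1) - pvS lines a) + (pvS lines (e + 1) - pvS lines (a + 1))
           = d + (pvS lines (e + 1) - pvS lines a) := by ring
      rw [this]

theorem pvPhase1Aux (lines : List String) (b : Int) :
    ∀ (n : Nat) (a d : Int), 0 ≤ a → (b - a).toNat = n →
      pvInnerA lines (PySem.List.pyRange a b) d false =
        (match pvFindFirst (fun j => PySem.Str.isIn "{" (PySem.List.pyGetD lines j ""))
                 (PySem.List.pyRange a b) with
         | none => none
         | some o => pvFindFirst (fun e => d + (pvS lines (e + 1) - pvS lines a) == 0)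
                       (PySem.List.pyRange o b)) := by
  intro n
  induction n with
  | zero =>
    intro a d ha hn
    rw [PySem.List.pyRange_one_eq_nil (by omega)]
    rfl
  | succ m ih =>
    intro a d ha hn
    have hlt : a < b := by omega
    rw [PySem.List.pyRange_one_cons hlt]
    simp only [pvInnerA, pvFindFirst, Bool.false_or]
    have hstep := pvS_step lines a ha
    have hc : d + (PySem.Str.count (PySem.List.pyGetD lines a "") "{" : Int)
              - (PySem.Str.count (PySem.List.pyGetD lines a "") "}" : Int)
            = d + (pvS lines (a + 1) - pvS lines a) := by
      rw [hstep]; unfold pvNet; ring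
    have hpredeq : ∀ (e : Int),
        (d + (pvS lines (a + 1) - pvS lines a) + (pvS lines (e + 1) - pvS lines (a + 1)) == 0)
        = (d + (pvS lines (e + 1) - pvS lines a) == 0) := by
      intro e
      have : d + (pvS lines (a + 1) - pvS lines a) + (pvS lines (e + 1) - pvS lines (a + 1))
           = d + (pvS lines (e + 1) - pvS lines a) := by ring
      rw [this]
    by_cases hop : PySem.Str.isIn "{" (PySem.List.pyGetD lines a "") = true
    · simp only [hop, Bool.true_and, if_true]
      rw [PySem.List.pyRange_one_cons hlt, pvFindFirst]
      rw [hc]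
      split
      · rfl
      · rw [pvPhase2Aux lines b m (a + 1) (d + (pvS lines (a + 1) - pvS lines a)) (by omega) (by omega)]
        exact pvFindFirst_congr _ _ _ (fun e _ => hpredeq e)
    · simp only [Bool.not_eq_true] at hop
      simp only [hop, Bool.false_and]
      rw [if_neg (by simp), if_neg (by simp), hc]
      rw [ih (a + 1) (d + (pvS lines (a + 1) - pvS lines a)) (by omega) (by omega)]
      cases hff : pvFindFirst (fun j => PySem.Str.isIn "{" (PySem.List.pyGetD lines j ""))
          (PySem.List.pyRange (a + 1) b) with
      | none => simp
      | some o =>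
        simp only
        exact pvFindFirst_congr _ _ _ (fun e _ => hpredeq e)

theorem pvS_zero (ls : List String) : pvS ls 0 = 0 := by simp [pvS]

theorem pvS_cons (l : String) (ls : List String) (m : Nat) :
    pvS (l :: ls) ((m : Int) + 1) = pvNet l + pvS ls (m : Int) := by
  unfold pvS
  have h1 : ((m : Int) + 1).toNat = m + 1 := by omega
  have h2 : ((m : Int)).toNat = m := by omega
  rw [h1, h2, List.take_succ_cons]
  simp

theorem pvPreFold (lines : List String) : ∀ (ps : List Int) (s : Int),
    lines.foldl (fun (acc : List Int × Int) line =>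
      let t := acc.2 + (PySem.Str.count line "{" : Int) - (PySem.Str.count line "}" : Int)
      (acc.1 ++ [t], t)) (ps, s) =
    (ps ++ (List.range lines.length).map (fun (k : Nat) => s + pvS lines ((k : Int) + 1)),
     s + pvS lines (lines.length : Int)) := by
  induction lines with
  | nil => intro ps s; simp [pvS]
  | cons l ls ih =>
    intro ps s
    simp only [List.foldl_cons]
    rw [ih]
    have hc : s + (PySem.Str.count l "{" : Int) - (PySem.Str.count l "}" : Int) = s + pvNet l := by
      unfold pvNet; ring
    rw [hc]
    have hlen : ((l :: ls).length : Int) = (ls.length : Int) + 1 := by simp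
    refine Prod.ext ?_ ?_
    · simp only [List.length_cons, List.range_succ_eq_map, List.map_cons, List.map_map]
      rw [List.append_assoc]
      congr 1
      simp only [List.singleton_append]
      congr 1
      · rw [pvS_cons]; simp [pvS_zero]
      · apply List.map_congr_left
        intro k _
        simp only [Function.comp_apply]
        rw [show ((Nat.succ k : Nat) : Int) + 1 = ((k + 1 : Nat) : Int) + 1 by push_cast; ring,
            pvS_cons l ls (k + 1)]
        push_cast
        ring
    · simp only [hlen]
      rw [pvS_cons]
      ring

theorem pvGetD_cons_pos {α : Type} (x : α) (xs : List α) (i : Int) (d : α) (h : 0 < i) :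
    PySem.List.pyGetD (x :: xs) i d = PySem.List.pyGetD xs (i - 1) d := by
  simp only [PySem.List.pyGetD, PySem.List.pyGet?, PySem.List.pyIdx?]
  have h1 : 0 ≤ i := by omega
  have h2 : 0 ≤ i - 1 := by omega
  by_cases h3 : i < ((x :: xs).length : Int)
  · have h4 : i - 1 < (xs.length : Int) := by simp at h3; omega
    simp only [if_pos h1, if_pos h3, if_pos h2, if_pos h4]
    simp only [Option.bind_some]
    have h5 : i.toNat = (i - 1).toNat + 1 := by omega
    rw [h5]
    simp
  · have h5 : ¬ (i ≤ (xs.length : Int)) := by simp at h3; omega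
    have h6 : (1 : Int) ≤ i := by omega
    simp [h5, h6, h1]

theorem pvPre_getD (lines : List String) (k : Int) (h0 : 0 ≤ k) (h1 : k ≤ (lines.length : Int)) :
    PySem.List.pyGetD
      ((lines.foldl (fun (acc : List Int × Int) line =>
        let t := acc.2 + (PySem.Str.count line "{" : Int) - (PySem.Str.count line "}" : Int)
        (acc.1 ++ [t], t)) ([0], 0)).1) k 0 = pvS lines k := by
  rw [pvPreFold]
  simp only
  rcases eq_or_lt_of_le h0 with h | h
  · rw [← h]
    simp [PySem.List.pyGetD_zero_cons, pvS_zero]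
  · rw [List.singleton_append, pvGetD_cons_pos _ _ _ _ h]
    have hlt : k - 1 < ((List.map (fun (k : Nat) => 0 + pvS lines ((k : Int) + 1)) (List.range lines.length)).length : Int) := by
      simp; omega
    rw [PySem.List.pyGetD_eq_getElem _ _ (by omega) hlt]
    simp only [List.getElem_map, List.getElem_range]
    have : (((k - 1).toNat : Int) + 1) = k := by omega
    rw [this]
    ring

theorem pvEnumAux {α : Type} (xs : List α) (d : α) : ∀ (s : Int), 0 ≤ s →
    PySem.List.enumerate xs s =
      (PySem.List.pyRange s (s + (xs.length : Int))).map
        (fun i => (i, PySem.List.pyGetD xs (i - s) d)) := by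
  induction xs with
  | nil => intro s hs; simp [PySem.List.enumerate_nil, PySem.List.pyRange_one_eq_nil (by omega : s + ((0:Nat):Int) ≤ s)]
  | cons x xs ih =>
    intro s hs
    rw [PySem.List.enumerate_cons]
    have hlt : s < s + ((x :: xs).length : Int) := by simp only [List.length_cons]; push_cast; omega
    rw [PySem.List.pyRange_one_cons hlt, List.map_cons]
    refine List.cons_eq_cons.mpr ⟨?_, ?_⟩
    · simp [PySem.List.pyGetD_zero_cons]
    · rw [ih (s + 1) (by omega)]
      have : s + ((x :: xs).length : Int) = (s + 1) + (xs.length : Int) := by simp only [List.length_cons]; push_cast; ring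
      rw [this]
      apply List.map_congr_left
      intro i hi
      have hmem := PySem.List.mem_pyRange_one.mp hi
      have hpos : 0 < i - s := by omega
      rw [pvGetD_cons_pos x xs (i - s) d hpos]
      have : i - s - 1 = i - (s + 1) := by ring
      rw [this]

theorem pvFindFirst_mem (p : Int → Bool) (l : List Int) (o : Int)
    (h : pvFindFirst p l = some o) : o ∈ l := by
  induction l with
  | nil => simp [pvFindFirst] at h
  | cons x xs ih =>
    simp only [pvFindFirst] at h
    split at h
    · simp at h; simp [h]
    · simp [ih h]

theorem pvSliceMap {α β : Type} (f : α → β) (xs : List α) (a b : Int)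
    (h0 : 0 ≤ a) (h1 : 0 ≤ b) (h2 : a ≤ (xs.length : Int)) (h3 : b ≤ (xs.length : Int)) :
    PySem.List.slice (xs.map f) (some a) (some b) = (PySem.List.slice xs (some a) (some b)).map f := by
  rw [PySem.List.slice_of_nonneg _ h0 h1 h2 h3,
      PySem.List.slice_of_nonneg _ h0 h1 (by simpa using h2) (by simpa using h3)]
  simp

theorem pvMatchComm {α : Type} (ff : Option Int) (F : Int → Option Int) (A : Int → α) (bl : α) :
    (match (match ff with | some o => F o | none => none) with | some e => A e | none => bl)
    = (match ff with | some o => (match F o with | some e => A e | none => bl) | none => bl) := by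
  cases ff <;> rfl

-- ===== VERDICT (by name: the statement is the Claim_ definition above) =====
theorem find_test_blocks_spec : Claim_equal_find_test_blocks := by
  intro lines _
  unfold Spec_find_test_blocks find_test_blocks find_test_blocks_alt
  rw [pvEnumAux lines "" 0 (by omega), zero_add, List.foldl_map]
  apply PySem.List.foldl_congr_mem
  intro blocks idx hmem
  obtain ⟨hidx0, hidxn⟩ := PySem.List.mem_pyRange_one.mp hmem
  simp only [sub_zero]
  -- the two membership tests
  have hfalse1 : (false : Bool) = PySem.Str.isIn "mod tests" "" := by decide
  have hmods : PySem.List.pyGetD (lines.map (fun line => PySem.Str.isIn "mod tests" line)) idx false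
      = PySem.Str.isIn "mod tests" (PySem.List.pyGetD lines idx "") := by
    rw [hfalse1, PySem.List.pyGetD_map]
  have hcfg : (PySem.List.slice (lines.map (fun line => PySem.Str.isIn "cfg(test)" line))
        (some (max (idx - 3) 0)) (some idx)).any id
      = (PySem.List.slice lines (some (max (idx - 3) 0)) (some idx)).any
          (fun c => PySem.Str.isIn "cfg(test)" c) := by
    rw [pvSliceMap _ _ _ _ (by omega) hidx0 (by omega) (by omega)]
    simp [List.any_map, Function.comp]
  -- the inner scan
  have hinner : pvInnerA lines (PySem.List.pyRange idx (lines.length : Int)) 0 false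
      = (match pvFindFirst (fun j => PySem.List.pyGetD
              (lines.map (fun line => PySem.Str.isIn "{" line)) j false)
            (PySem.List.pyRange idx (lines.length : Int)) with
         | some o => pvFindFirst (fun e =>
              PySem.List.pyGetD ((lines.foldl (fun (acc : List Int × Int) line =>
                let t := acc.2 + (PySem.Str.count line "{" : Int) - (PySem.Str.count line "}" : Int)
                (acc.1 ++ [t], t)) ([0], 0)).1) (e + 1) 0 ==
              PySem.List.pyGetD ((lines.foldl (fun (acc : List Int × Int) line =>
                let t := acc.2 + (PySem.Str.count line "{" : Int) - (PySem.Str.count line "}" : Int)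
                (acc.1 ++ [t], t)) ([0], 0)).1) idx 0)
            (PySem.List.pyRange o (lines.length : Int))
         | none => none) := by
    rw [pvPhase1Aux lines (lines.length : Int) ((lines.length : Int) - idx).toNat idx 0 hidx0 rfl]
    have hopens : pvFindFirst (fun j => PySem.Str.isIn "{" (PySem.List.pyGetD lines j ""))
          (PySem.List.pyRange idx (lines.length : Int))
        = pvFindFirst (fun j => PySem.List.pyGetD
              (lines.map (fun line => PySem.Str.isIn "{" line)) j false)
            (PySem.List.pyRange idx (lines.length : Int)) := by
      apply pvFindFirst_congr
      intro j _
      rw [show (false : Bool) = PySem.Str.isIn "{" "" by decide, PySem.List.pyGetD_map]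
    rw [hopens]
    cases hff : pvFindFirst (fun j => PySem.List.pyGetD
        (lines.map (fun line => PySem.Str.isIn "{" line)) j false)
        (PySem.List.pyRange idx (lines.length : Int)) with
    | none => rfl
    | some o =>
      simp only
      have ho := PySem.List.mem_pyRange_one.mp (pvFindFirst_mem _ _ _ hff)
      apply pvFindFirst_congr
      intro e he
      have heb := PySem.List.mem_pyRange_one.mp he
      rw [pvPre_getD lines (e + 1) (by omega) (by omega),
          pvPre_getD lines idx (by omega) (by omega)]
      by_cases h : pvS lines (e + 1) = pvS lines idx
      · simp [h]
      · have h2 : pvS lines (e + 1) - pvS lines idx ≠ 0 := by omega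
        simp [h, h2]
  -- assemble the two bodies
  rw [hinner, ← hmods, ← hcfg]
  cases hc1 : PySem.List.pyGetD (lines.map (fun line => PySem.Str.isIn "mod tests" line)) idx false <;>
    cases hc2 : (PySem.List.slice (lines.map (fun line => PySem.Str.isIn "cfg(test)" line))
        (some (max (idx - 3) 0)) (some idx)).any id <;>
    simp only [Bool.not_true, Bool.not_false, Bool.true_and, Bool.false_and,
      Bool.false_eq_true, Bool.true_eq_false, if_true, if_false, ite_true, ite_false]
  · exact pvMatchComm _ _ _ _
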